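-- pv_equiv track=rewrite | github.com/hatuna-827/nonogram_solver | main.py | fill_line
-- ===== SOURCE A (Python) =====
-- def fill_line(grid,Hb_sum,Hw,h):
--   for i in range(1,len(Hw)-1):
--     Hw[i]+=1
--   fill(grid,h,0,h,Hw[0],".")
--   Hw_sum=[0]
--   for i in range(len(Hw)):
--     Hw_sum.append(Hw_sum[-1]+Hw[i])
--   for i in range(1,len(Hw)):
--     fill(grid,h,Hw_sum[i]+Hb_sum[i-1],h,Hw_sum[i]+Hb_sum[i],"#")
--     fill(grid,h,Hw_sum[i]+Hb_sum[i],h,Hw_sum[i+1]+Hb_sum[i],".")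
--   for i in range(1,len(Hw)-1):
--     Hw[i]-=1
--   return grid
--
-- def fill(grid,start_h,start_w,end_h,end_w,content):
--   if start_w==-1:
--     start_w=0
--   for h in range(start_h,end_h+1):
--     for w in range(start_w,end_w):
--       grid[h][w]=content
--   return grid
-- ===== SOURCE B (Python) =====
-- def fill_line(grid, Hb_sum, Hw, h):
--     # Build the run segments after the leading gap, then paint them with one running cursor.
--     segs = []
--     for i in range(1, len(Hw)):
--         segs.append(("#", Hb_sum[i] - Hb_sum[i - 1]))
--         segs.append((".", Hw[i] + (1 if i <= len(Hw) - 2 else 0)))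
--     for k in range(0, Hw[0]):
--         grid[h][k] = "."
--     # the first block starts after the leading gap, offset by the base prefix sum
--     w = Hw[0] + (Hb_sum[0] if len(Hw) > 1 else 0)
--     for content, length in segs:
--         for k in range(w, w + length):
--             grid[h][k] = content
--         w += length
--     return grid
-- ===== Notes on version B (the rewrite author's own statement) =====
-- stated objective: simpler
-- what changed: Replaces the temporary Hw mutation, the prefix-sum array Hw_sum and the offset-computed 2D fill() calls by building the run segments once and painting the row cell-by-cell with one running cursor.
-- outside the precondition, e.g. on fill_line([['x']], [-1, 0], [0, 0], 0): A returns [['x']], B returns [['#']]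
import Mathlib
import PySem

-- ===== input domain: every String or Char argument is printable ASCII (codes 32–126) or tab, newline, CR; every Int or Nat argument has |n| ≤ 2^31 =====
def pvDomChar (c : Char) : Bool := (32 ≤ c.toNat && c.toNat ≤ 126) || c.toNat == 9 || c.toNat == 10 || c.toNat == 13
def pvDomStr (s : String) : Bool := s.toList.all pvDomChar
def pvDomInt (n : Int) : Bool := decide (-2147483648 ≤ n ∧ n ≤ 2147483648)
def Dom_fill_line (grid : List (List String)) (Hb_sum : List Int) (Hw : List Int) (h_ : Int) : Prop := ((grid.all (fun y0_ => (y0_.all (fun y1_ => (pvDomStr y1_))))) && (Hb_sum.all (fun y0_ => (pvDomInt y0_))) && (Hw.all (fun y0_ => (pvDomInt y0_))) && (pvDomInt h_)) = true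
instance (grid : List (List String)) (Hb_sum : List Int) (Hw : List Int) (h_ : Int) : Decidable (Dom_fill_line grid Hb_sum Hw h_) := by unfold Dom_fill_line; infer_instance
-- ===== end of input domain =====

-- B replaces A's temporary Hw mutation, prefix-sum array and offset-computed fill() calls by run
-- segments painted with one running cursor (objective: simpler).  Both Pythons mutate `grid` in
-- place identically and return it (A also bumps interior Hw entries but restores them before
-- returning); the theorems below are about the returned value.

-- ===== PORT A =====
def pvFill (grid : List (List String)) (start_h start_w end_h end_w : Int) (content : String) : List (List String) :=
  let start_w := if start_w = -1 then 0 else start_w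
  (PySem.List.pyRange start_h (end_h + 1) 1).foldl
    (fun g h =>
      (PySem.List.pyRange start_w end_w 1).foldl
        (fun g w => PySem.List.pySetD g h (PySem.List.pySetD (PySem.List.pyGetD g h []) w content)) g)
    grid

-- the final `Hw[i] -= 1` restore loop of A does not affect the returned grid and is dropped
def fill_line (grid : List (List String)) (Hb_sum : List Int) (Hw : List Int) (h_ : Int) : List (List String) :=
  let Hw1 := (PySem.List.pyRange 1 ((Hw.length : Int) - 1) 1).foldl
    (fun l i => PySem.List.pySetD l i (PySem.List.pyGetD l i 0 + 1)) Hw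
  let g1 := pvFill grid h_ 0 h_ (PySem.List.pyGetD Hw1 0 0) "."
  let Hw_sum := (PySem.List.pyRange 0 (Hw1.length : Int) 1).foldl
    (fun s i => s ++ [PySem.List.pyGetD s (-1) 0 + PySem.List.pyGetD Hw1 i 0]) [(0 : Int)]
  (PySem.List.pyRange 1 (Hw1.length : Int) 1).foldl
    (fun g i =>
      let g := pvFill g h_ (PySem.List.pyGetD Hw_sum i 0 + PySem.List.pyGetD Hb_sum (i - 1) 0) h_
                 (PySem.List.pyGetD Hw_sum i 0 + PySem.List.pyGetD Hb_sum i 0) "#"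
      pvFill g h_ (PySem.List.pyGetD Hw_sum i 0 + PySem.List.pyGetD Hb_sum i 0) h_
        (PySem.List.pyGetD Hw_sum (i + 1) 0 + PySem.List.pyGetD Hb_sum i 0) ".")
    g1

-- ===== PORT B =====
def fill_line_alt (grid : List (List String)) (Hb_sum : List Int) (Hw : List Int) (h_ : Int) : List (List String) :=
  let n : Int := (Hw.length : Int)
  let segs := (PySem.List.pyRange 1 n 1).foldl
    (fun s i => s ++ [("#", PySem.List.pyGetD Hb_sum i 0 - PySem.List.pyGetD Hb_sum (i - 1) 0),
                      (".", PySem.List.pyGetD Hw i 0 + (if i ≤ n - 2 then 1 else 0))]) []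
  let grid := (PySem.List.pyRange 0 (PySem.List.pyGetD Hw 0 0) 1).foldl
    (fun g k => PySem.List.pySetD g h_ (PySem.List.pySetD (PySem.List.pyGetD g h_ []) k ".")) grid
  let w0 := PySem.List.pyGetD Hw 0 0 + (if 1 < n then PySem.List.pyGetD Hb_sum 0 0 else 0)
  let st := segs.foldl
    (fun (st : List (List String) × Int) seg =>
      ((PySem.List.pyRange st.2 (st.2 + seg.2) 1).foldl
         (fun g k => PySem.List.pySetD g h_ (PySem.List.pySetD (PySem.List.pyGetD g h_ []) k seg.1)) st.1,
       st.2 + seg.2))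
    (grid, w0)
  st.1

-- ===== PRECONDITION & SPEC =====
-- number of cells in row h (Python's wrapped index), 0 if h is out of range
def pvRowLen (grid : List (List String)) (h_ : Int) : Int :=
  ((grid.getD (if 0 ≤ h_ then h_.toNat else (h_ + (grid.length : Int)).toNat) []).length : Int)

-- position where block gap i starts: prefix sum of Hw plus the interior +1 bumps applied so far
def pvS (Hw : List Int) (i : Nat) : Int :=
  (Hw.take i).sum + ((min (i - 1) (Hw.length - 2) : Nat) : Int)

-- a painted span [s, e) is fine if it is empty, or the row index and every cell index are in range
def pvSegOK (grid : List (List String)) (h_ s e : Int) : Bool :=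
  if s < e then
    decide (-(grid.length : Int) ≤ h_) && decide (h_ < (grid.length : Int)) &&
    decide (-(pvRowLen grid h_) ≤ s) && decide (e ≤ pvRowLen grid h_)
  else true

-- Pre_ is exactly the inputs on which A returns, minus one artefact corner: it excludes inputs
-- where A raises IndexError (empty Hw, Hb_sum shorter than Hw, or a painted cell outside row h)
-- and the boundary inputs where a loop fill would start exactly at -1 with a nonempty span, on
-- which fill()'s start_w == -1 clamp silently repaints from cell 0 instead of cell -1 — an
-- accident of A's implementation (see the cited excluded example).
def Pre_fill_line (grid : List (List String)) (Hb_sum : List Int) (Hw : List Int) (h_ : Int) : Prop :=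
  Hw ≠ [] ∧ (2 ≤ Hw.length → Hw.length ≤ Hb_sum.length) ∧
  pvSegOK grid h_ 0 (Hw.getD 0 0) = true ∧
  (∀ j ∈ List.range Hw.length, 1 ≤ j →
    pvSegOK grid h_ (pvS Hw j + Hb_sum.getD (j - 1) 0) (pvS Hw j + Hb_sum.getD j 0) = true ∧
    pvSegOK grid h_ (pvS Hw j + Hb_sum.getD j 0) (pvS Hw (j + 1) + Hb_sum.getD j 0) = true ∧
    (pvS Hw j + Hb_sum.getD (j - 1) 0 = -1 → pvS Hw j + Hb_sum.getD j 0 ≤ -1) ∧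
    (pvS Hw j + Hb_sum.getD j 0 = -1 → pvS Hw (j + 1) + Hb_sum.getD j 0 ≤ -1))

instance (grid : List (List String)) (Hb_sum : List Int) (Hw : List Int) (h_ : Int) : Decidable (Pre_fill_line grid Hb_sum Hw h_) := by unfold Pre_fill_line; infer_instance

def pvWitness_fill_line : List (List String) × List Int × List Int × Int :=
  ([["x", "x", "x", "x", "x", "x", "x", "x"]], [0, 2, 3], [2, 1, 1], 0)

def Spec_fill_line (grid : List (List String)) (Hb_sum : List Int) (Hw : List Int) (h_ : Int) (out : List (List String)) : Prop := out = fill_line_alt grid Hb_sum Hw h_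
instance (grid : List (List String)) (Hb_sum : List Int) (Hw : List Int) (h_ : Int) (out : List (List String)) : Decidable (Spec_fill_line grid Hb_sum Hw h_ out) := by unfold Spec_fill_line; infer_instance

-- ===== CLAIM (what is proved, stated in full; the proofs are below) =====
def Claim_equal_fill_line : Prop := ∀ (grid : List (List String)) (Hb_sum : List Int) (Hw : List Int) (h_ : Int), Dom_fill_line grid Hb_sum Hw h_ → Pre_fill_line grid Hb_sum Hw h_ → Spec_fill_line grid Hb_sum Hw h_ (fill_line grid Hb_sum Hw h_)

-- ===== LEMMAS AND PROOFS =====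

-- paint cells [a, b) of row h with content c: the per-cell write loop both ports share
def pvGPaint (h_ : Int) (g : List (List String)) (a b : Int) (c : String) : List (List String) :=
  (PySem.List.pyRange a b 1).foldl
    (fun g k => PySem.List.pySetD g h_ (PySem.List.pySetD (PySem.List.pyGetD g h_ []) k c)) g

def pvSI (Hw1 : List Int) (i : Int) : Int := (Hw1.take i.toNat).sum
def pvBI (Hb_sum : List Int) (i : Int) : Int := Hb_sum.getD i.toNat 0

lemma pvGetD_nonneg {α : Type} (xs : List α) (i : Int) (d : α) (hi : 0 ≤ i) :
    PySem.List.pyGetD xs i d = xs.getD i.toNat d := by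
  obtain ⟨k, rfl⟩ := Int.eq_ofNat_of_zero_le hi
  simp

lemma pvSet_getD_eq {α : Type} (l : List α) (h : Nat) (hh : h < l.length) (v d : α) :
    (l.set h v).getD h d = v := by
  unfold List.getD
  rw [List.getElem?_set_self (by simpa using hh)]
  simp

-- a fill over the single row h, with fill's start_w == -1 clamp
lemma pvFill_eq (g : List (List String)) (h_ s e : Int) (c : String) :
    pvFill g h_ s h_ e c = pvGPaint h_ g (if s = -1 then 0 else s) e c := by
  unfold pvFill pvGPaint
  rw [PySem.List.pyRange_one_singleton, List.foldl_cons, List.foldl_nil]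

-- the clamp is invisible when a span that starts at -1 is empty
lemma pvGPaint_clamp (h_ : Int) (g : List (List String)) (s e : Int) (c : String)
    (hcl : s = -1 → e ≤ -1) :
    pvGPaint h_ g (if s = -1 then 0 else s) e c = pvGPaint h_ g s e c := by
  split_ifs with hs
  · subst hs
    have he := hcl rfl
    unfold pvGPaint
    rw [PySem.List.pyRange_one_eq_nil (by omega), PySem.List.pyRange_one_eq_nil (by omega)]
  · rfl

lemma pvSumTakeSucc (l : List Int) (m : Nat) (hm : m < l.length) :
    (l.take (m + 1)).sum = (l.take m).sum + l.getD m 0 := by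
  rw [List.sum_take_succ l m hm]
  simp [List.getD, List.getElem?_eq_getElem hm]

lemma pvBumpLenGo (l : List Int) (ks : List Nat) :
    (ks.foldl (fun l k => l.set k (l.getD k 0 + 1)) l).length = l.length := by
  induction ks generalizing l with
  | nil => rfl
  | cons k ks ih => rw [List.foldl_cons, ih, List.length_set]

lemma pvBumpGetGo (l : List Int) (ks : List Nat) (hnd : ks.Nodup)
    (hlt : ∀ k ∈ ks, k < l.length) (j : Nat) :
    ((ks.foldl (fun l k => l.set k (l.getD k 0 + 1)) l)).getD j 0
      = l.getD j 0 + (if j ∈ ks then 1 else 0) := by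
  induction ks generalizing l with
  | nil => simp
  | cons k ks ih =>
    rw [List.foldl_cons, ih _ (List.nodup_cons.mp hnd).2
        (fun k' hk' => by rw [List.length_set]; exact hlt k' (by simp [hk'])) ]
    by_cases hjk : j = k
    · subst hjk
      have hjl : j < l.length := hlt j (by simp)
      have hjn : j ∉ ks := (List.nodup_cons.mp hnd).1
      rw [pvSet_getD_eq l j hjl]
      simp [hjn]
    · have : (l.set k (l.getD k 0 + 1)).getD j 0 = l.getD j 0 := by
        unfold List.getD
        rw [List.getElem?_set_ne (by omega)]
      rw [this]
      simp [hjk]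

-- the interior +1 bump, in the exact shape A's first loop has
lemma pvBump (Hw : List Int) (n : Nat) (hn : Hw.length = n) :
    (PySem.List.pyRange 1 ((n : Int) - 1) 1).foldl
        (fun l i => PySem.List.pySetD l i (PySem.List.pyGetD l i 0 + 1)) Hw
      = (((List.range (n - 2)).map (fun k => 1 + k)).foldl
          (fun l k => l.set k (l.getD k 0 + 1)) Hw) := by
  rw [PySem.List.pyRange_one]
  have ht : ((n : Int) - 1 - 1).toNat = n - 2 := by omega
  rw [ht, List.foldl_map, List.foldl_map]
  congr 1
  funext l k
  have hc : (1 : Int) + (k : Int) = ((1 + k : Nat) : Int) := by push_cast; ring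
  rw [hc, PySem.List.pySetD_natCast, PySem.List.pyGetD_natCast]

-- Hw_sum is the prefix-sum table of the (bumped) Hw
lemma pvHwSum (l : List Int) (m : Nat) (hm : m ≤ l.length) :
    (PySem.List.pyRange 0 (m : Int) 1).foldl
        (fun s i => s ++ [PySem.List.pyGetD s (-1) 0 + PySem.List.pyGetD l i 0]) [(0 : Int)]
      = (List.range (m + 1)).map (fun j => (l.take j).sum) := by
  induction m with
  | zero => simp [PySem.List.pyRange_one_eq_nil]
  | succ m ih =>
    have h1 : ((m + 1 : Nat) : Int) = (m : Int) + 1 := by push_cast; ring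
    rw [h1, PySem.List.pyRange_one_succ_right (by exact_mod_cast Nat.zero_le m),
        List.foldl_append, ih (by omega), List.foldl_cons, List.foldl_nil]
    have h2 : (List.range (m + 1)).map (fun j => (l.take j).sum)
        = (List.range m).map (fun j => (l.take j).sum) ++ [(l.take m).sum] := by
      rw [List.range_succ, List.map_append]; rfl
    have hlast : PySem.List.pyGetD ((List.range (m + 1)).map (fun j => (l.take j).sum)) (-1) 0
        = (l.take m).sum := by
      rw [h2]; exact PySem.List.pyGetD_neg_one_append_singleton _ _ 0
    rw [hlast, PySem.List.pyGetD_natCast]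
    conv_rhs => rw [List.range_succ, List.map_append]
    congr 1
    rw [List.map_singleton, pvSumTakeSucc l m (by omega)]

lemma pvS_get (Hw1 : List Int) (m : Nat) (i : Int) (h0 : 0 ≤ i) (hi : i ≤ (m : Int)) :
    PySem.List.pyGetD ((List.range (m + 1)).map (fun j => (Hw1.take j).sum)) i 0 = pvSI Hw1 i := by
  rw [pvGetD_nonneg _ _ _ h0]
  have ht : i.toNat < m + 1 := by omega
  rw [PySem.List.getD_map_range _ _ _ _ ht]
  rfl

-- the closed-form gap-start positions of Pre_ agree with the bumped prefix sums
lemma pvS_eq (Hw Hw1 : List Int) (n : Nat) (hn : Hw.length = n) (hlen1 : Hw1.length = n)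
    (hget1 : ∀ k : Nat, k < n →
      Hw1.getD k 0 = Hw.getD k 0 + (if 1 ≤ k ∧ k + 1 < n then 1 else 0)) :
    ∀ j : Nat, j ≤ n → pvSI Hw1 (j : Int) = pvS Hw j := by
  intro j
  induction j with
  | zero => intro _; simp [pvSI, pvS]
  | succ j ih =>
    intro hj
    have hij : j < n := by omega
    have hs1 : pvSI Hw1 ((j + 1 : Nat) : Int) = pvSI Hw1 (j : Int) + Hw1.getD j 0 := by
      unfold pvSI
      rw [Int.toNat_natCast, Int.toNat_natCast]
      exact pvSumTakeSucc Hw1 j (by omega)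
    rw [hs1, ih (by omega), hget1 j hij]
    unfold pvS
    rw [hn, pvSumTakeSucc Hw j (by omega)]
    split_ifs <;> push_cast <;> omega

-- ===== core: B's cursor walk equals A's offset-computed paints =====
lemma pvCore (Hb_sum Hw Hw1 : List Int) (n : Nat) (h2 : 2 ≤ n)
    (hget1 : ∀ k : Nat, k < n → Hw1.getD k 0 = Hw.getD k 0 + (if 1 ≤ k ∧ k + 1 < n then 1 else 0))
    (hlen1 : Hw1.length = n)
    (SI : Int → Int) (hSI : ∀ i : Int, SI i = (Hw1.take i.toNat).sum)
    (bI : Int → Int) (hbI : ∀ i : Int, bI i = Hb_sum.getD i.toNat 0)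
    (step : (List (List String) × Int) → (String × Int) → (List (List String) × Int))
    (paint : List (List String) → Int → Int → String → List (List String))
    (hstep : ∀ st seg, step st seg = (paint st.1 st.2 (st.2 + seg.2) seg.1, st.2 + seg.2)) :
    ∀ (k : Nat), 1 ≤ k → k ≤ n → ∀ (r : List (List String)),
      ((PySem.List.pyRange 1 (k : Int) 1).foldl
          (fun s i => s ++ [("#", PySem.List.pyGetD Hb_sum i 0 - PySem.List.pyGetD Hb_sum (i - 1) 0),
                            (".", PySem.List.pyGetD Hw i 0 + (if i ≤ (n : Int) - 2 then 1 else 0))]) []).foldl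
        step (r, Hw.getD 0 0 + bI 0)
      = ((PySem.List.pyRange 1 (k : Int) 1).foldl
           (fun r i => paint (paint r (SI i + bI (i - 1)) (SI i + bI i) "#")
                         (SI i + bI i) (SI (i + 1) + bI i) ".") r,
         SI (k : Int) + bI ((k : Int) - 1)) := by
  intro k hk1
  induction k, hk1 using Nat.le_induction with
  | base =>
    intro _ r
    rw [Nat.cast_one, PySem.List.pyRange_one_eq_nil le_rfl]
    simp only [List.foldl_nil]
    have hS1 : SI 1 = Hw.getD 0 0 := by
      rw [hSI]
      have h0 : (Hw1.take ((1 : Int).toNat)).sum = (Hw1.take 0).sum + Hw1.getD 0 0 :=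
        pvSumTakeSucc Hw1 0 (by omega)
      rw [h0, hget1 0 (by omega)]
      simp
    rw [hS1]
    norm_num
  | succ k hk ih =>
    intro hk1n r
    have hkc : (1 : Int) ≤ (k : Int) := by exact_mod_cast hk
    have hcast : ((k + 1 : Nat) : Int) = (k : Int) + 1 := by push_cast; ring
    rw [hcast, PySem.List.pyRange_one_succ_right hkc]
    simp only [List.foldl_append, List.foldl_cons, List.foldl_nil]
    rw [ih (by omega) r, hstep, hstep]
    have hbk : PySem.List.pyGetD Hb_sum ((k : Int)) 0 = bI (k : Int) := by
      rw [pvGetD_nonneg _ _ _ (by omega), hbI]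
    have hbk1 : PySem.List.pyGetD Hb_sum ((k : Int) - 1) 0 = bI ((k : Int) - 1) := by
      rw [pvGetD_nonneg _ _ _ (by omega), hbI]
    have hwk : PySem.List.pyGetD Hw ((k : Int)) 0 = Hw.getD k 0 := by
      simp
    rw [hbk, hbk1, hwk]
    have e1 : SI (k : Int) + bI ((k : Int) - 1) + (bI (k : Int) - bI ((k : Int) - 1))
        = SI (k : Int) + bI (k : Int) := by ring
    rw [e1]
    have hSI1 : SI ((k : Int) + 1) = SI (k : Int) + Hw1.getD k 0 := by
      rw [hSI, hSI]
      have ht1 : ((k : Int) + 1).toNat = k + 1 := by omega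
      have ht2 : ((k : Int)).toNat = k := by omega
      rw [ht1, ht2]
      exact pvSumTakeSucc Hw1 k (by omega)
    have hite : (if (k : Int) ≤ (n : Int) - 2 then (1 : Int) else 0)
        = (if 1 ≤ k ∧ k + 1 < n then (1 : Int) else 0) := by
      split_ifs <;> first | rfl | omega
    have e2 : SI (k : Int) + bI (k : Int) + (Hw.getD k 0 + (if (k : Int) ≤ (n : Int) - 2 then (1 : Int) else 0))
        = SI ((k : Int) + 1) + bI (k : Int) := by
      rw [hite, hSI1, ← hget1 k (by omega)]
      ring
    rw [e2]
    have e3 : bI ((k : Int) + 1 - 1) = bI (k : Int) := by norm_num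
    rw [e3]

-- ===== VERDICT (by name: the statement is the Claim_ definition above) =====
theorem fill_line_spec : Claim_equal_fill_line := by
  intro grid Hb_sum Hw h_ _hdom hpre
  obtain ⟨hne, hblen, _hhead, hsegs⟩ := hpre
  unfold Spec_fill_line
  have hn1 : 0 < Hw.length := List.length_pos_of_ne_nil hne
  simp only [fill_line, fill_line_alt]
  rw [pvBump Hw Hw.length rfl]
  set Hw1 : List Int := ((List.range (Hw.length - 2)).map (fun k => 1 + k)).foldl
      (fun l k => l.set k (l.getD k 0 + 1)) Hw with hHw1
  have hlen1 : Hw1.length = Hw.length := pvBumpLenGo Hw _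
  have hget1 : ∀ k : Nat, k < Hw.length →
      Hw1.getD k 0 = Hw.getD k 0 + (if 1 ≤ k ∧ k + 1 < Hw.length then 1 else 0) := by
    intro k hk
    rw [hHw1, pvBumpGetGo Hw _ (List.Nodup.map (fun a b hab => by omega) List.nodup_range)
        (fun k' hk' => by
          simp only [List.mem_map, List.mem_range] at hk'
          obtain ⟨m, hm, rfl⟩ := hk'
          omega) k]
    congr 1
    have hiff : (k ∈ (List.range (Hw.length - 2)).map (fun k => 1 + k)) ↔ (1 ≤ k ∧ k + 1 < Hw.length) := by
      simp only [List.mem_map, List.mem_range]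
      constructor
      · rintro ⟨m, hm, rfl⟩; omega
      · rintro ⟨h1, h2⟩; exact ⟨k - 1, by omega, by omega⟩
    exact if_congr hiff rfl rfl
  rw [pvHwSum Hw1 Hw1.length le_rfl, hlen1]
  have hget10 : PySem.List.pyGetD Hw1 0 0 = Hw.getD 0 0 := by
    rw [PySem.List.pyGetD_zero, hget1 0 hn1]
    simp
  rw [pvFill_eq, if_neg (by decide : ¬ (0 : Int) = -1), hget10]
  -- A's loop in closed segment form
  trans ((PySem.List.pyRange 1 (Hw.length : Int) 1).foldl
      (fun g i => pvGPaint h_ (pvGPaint h_ g (pvSI Hw1 i + pvBI Hb_sum (i - 1)) (pvSI Hw1 i + pvBI Hb_sum i) "#")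
        (pvSI Hw1 i + pvBI Hb_sum i) (pvSI Hw1 (i + 1) + pvBI Hb_sum i) ".")
      (pvGPaint h_ grid 0 (Hw.getD 0 0) "."))
  · refine PySem.List.foldl_congr_mem _ _ _ _ ?_
    intro g i him
    obtain ⟨hi1, hin⟩ := (PySem.List.mem_pyRange_one).mp him
    obtain ⟨j, rfl⟩ := Int.eq_ofNat_of_zero_le (by omega : (0 : Int) ≤ i)
    have hj1 : 1 ≤ j := by exact_mod_cast hi1
    have hjn : j < Hw.length := by exact_mod_cast hin
    obtain ⟨_, _, hcl1, hcl2⟩ := hsegs j (List.mem_range.mpr hjn) hj1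
    have hSj : PySem.List.pyGetD ((List.range (Hw.length + 1)).map (fun j => (Hw1.take j).sum)) (j : Int) 0
        = pvSI Hw1 (j : Int) := pvS_get Hw1 _ _ (by omega) (by omega)
    have hSj1 : PySem.List.pyGetD ((List.range (Hw.length + 1)).map (fun j => (Hw1.take j).sum)) ((j : Int) + 1) 0
        = pvSI Hw1 ((j : Int) + 1) := pvS_get Hw1 _ _ (by omega) (by omega)
    have hbj : PySem.List.pyGetD Hb_sum (j : Int) 0 = pvBI Hb_sum (j : Int) := by
      rw [pvGetD_nonneg _ _ _ (by omega)]; rfl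
    have hbj1 : PySem.List.pyGetD Hb_sum ((j : Int) - 1) 0 = pvBI Hb_sum ((j : Int) - 1) := by
      rw [pvGetD_nonneg _ _ _ (by omega)]; rfl
    -- Pre_'s closed forms equal the bumped prefix sums / clue values
    have hps : pvSI Hw1 (j : Int) = pvS Hw j := pvS_eq Hw Hw1 Hw.length rfl hlen1 hget1 j (by omega)
    have hps1 : pvSI Hw1 ((j : Int) + 1) = pvS Hw (j + 1) := by
      have : ((j : Int) + 1) = ((j + 1 : Nat) : Int) := by push_cast; ring
      rw [this]
      exact pvS_eq Hw Hw1 Hw.length rfl hlen1 hget1 (j + 1) (by omega)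
    have hpb : pvBI Hb_sum (j : Int) = Hb_sum.getD j 0 := by simp [pvBI]
    have hpb1 : pvBI Hb_sum ((j : Int) - 1) = Hb_sum.getD (j - 1) 0 := by
      unfold pvBI
      congr 1
      omega
    rw [pvFill_eq, pvFill_eq, hSj, hSj1, hbj, hbj1,
        pvGPaint_clamp _ _ _ _ _ (by simp only [hps, hps1, hpb]; exact hcl2),
        pvGPaint_clamp _ _ _ _ _ (by simp only [hps, hpb, hpb1]; exact hcl1)]
  -- B side
  · rcases Nat.lt_or_ge Hw.length 2 with hlt2 | hge2
    · have hn1' : Hw.length = 1 := by omega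
      rw [hn1', Nat.cast_one, PySem.List.pyRange_one_eq_nil le_rfl]
      simp only [List.foldl_nil]
      rw [PySem.List.pyGetD_zero]
      rfl
    · have hcore := pvCore Hb_sum Hw Hw1 Hw.length hge2 hget1 hlen1
        (pvSI Hw1) (fun _ => rfl) (pvBI Hb_sum) (fun _ => rfl)
        (fun st seg =>
          ((PySem.List.pyRange st.2 (st.2 + seg.2) 1).foldl
             (fun g k => PySem.List.pySetD g h_ (PySem.List.pySetD (PySem.List.pyGetD g h_ []) k seg.1)) st.1,
           st.2 + seg.2))
        (fun g a b c => pvGPaint h_ g a b c) (fun st seg => rfl)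
        Hw.length (by omega) le_rfl
        ((PySem.List.pyRange 0 (Hw.getD 0 0) 1).foldl
          (fun g k => PySem.List.pySetD g h_ (PySem.List.pySetD (PySem.List.pyGetD g h_ []) k ".")) grid)
      rw [PySem.List.pyGetD_zero]
      have hw0' : Hw.getD 0 0
          + (if (1 : Int) < (Hw.length : Int) then PySem.List.pyGetD Hb_sum 0 0 else 0)
          = Hw.getD 0 0 + pvBI Hb_sum 0 := by
        rw [if_pos (by exact_mod_cast hge2 : (1 : Int) < (Hw.length : Int)),
            PySem.List.pyGetD_zero]
        rfl
      rw [hw0', hcore]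
      rfl
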